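-- pv_equiv track=rewrite | github.com/damonmhirschl-dotcom/project-neo | tests/v1_trend_backtest_v2.py | _get_current_session
-- ===== SOURCE A (Python) =====
-- from typing import Optional, List, Dict, Tuple
--
-- ASIA_SESSION_PAIRS = {
--     "AUDUSD","NZDUSD","AUDJPY","NZDJPY","USDJPY",
--     "AUDCAD","AUDNZD","CADJPY"
-- }
--
-- SESSION_WINDOWS_UTC = {
--     "asia":       (0,  8),
--     "london":     (8,  13),
--     "ny_overlap": (13, 17),
--     "ny_late":    (17, 21),
--     "dead_zone":  (21, 24),
-- }
--
-- def _get_current_session(close_hour: int, pair: str) -> Optional[str]: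
--     """Exact copy of live _get_current_session, applied to bar CLOSE hour."""
--     for session, (start, end) in SESSION_WINDOWS_UTC.items():
--         if session == "dead_zone":
--             continue
--         if start <= close_hour < end:
--             if session == "asia" and pair not in ASIA_SESSION_PAIRS:
--                 return None
--             return session
--     return None  # dead zone
-- ===== SOURCE B (Python) =====
-- from typing import Optional
--
-- ASIA_SESSION_PAIRS = {
--     "AUDUSD","NZDUSD","AUDJPY","NZDJPY","USDJPY",
--     "AUDCAD","AUDNZD","CADJPY"
-- }
--
-- HOUR_TO_SESSION = (
--     ["asia"] * 8 + ["london"] * 5 + ["ny_overlap"] * 4 + ["ny_late"] * 4 + [None] * 3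
-- )
--
-- def _get_current_session(close_hour: int, pair: str) -> Optional[str]:
--     if not (0 <= close_hour < 24):
--         return None
--     session = HOUR_TO_SESSION[close_hour]
--     if session is None:
--         return None
--     if session == "asia" and pair not in ASIA_SESSION_PAIRS:
--         return None
--     return session
-- ===== Notes on version B (the rewrite author's own statement) =====
-- stated objective: simpler
-- what changed: Replaces the ordered scan over session windows (range comparisons per window) with a direct 24-entry hour-to-session table lookup guarded by a range check.
import Mathlib
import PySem

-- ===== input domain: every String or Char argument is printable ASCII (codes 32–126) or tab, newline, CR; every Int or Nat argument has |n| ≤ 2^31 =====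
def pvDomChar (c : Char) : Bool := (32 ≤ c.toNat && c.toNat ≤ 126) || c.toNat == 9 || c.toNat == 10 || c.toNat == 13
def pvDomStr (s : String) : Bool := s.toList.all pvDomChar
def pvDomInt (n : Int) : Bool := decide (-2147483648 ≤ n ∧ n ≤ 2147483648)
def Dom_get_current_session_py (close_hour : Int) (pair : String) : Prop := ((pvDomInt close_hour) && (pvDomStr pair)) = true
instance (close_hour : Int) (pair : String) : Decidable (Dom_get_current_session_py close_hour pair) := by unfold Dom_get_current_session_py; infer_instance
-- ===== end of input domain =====

-- B replaces A's ordered scan over session windows with a direct 24-entry hour table lookup (simpler).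

-- shared module constant ASIA_SESSION_PAIRS (a Python set; membership only)
def pvAsiaPairs : List String :=
  ["AUDUSD","NZDUSD","AUDJPY","NZDJPY","USDJPY","AUDCAD","AUDNZD","CADJPY"]

-- ===== PORT A =====
-- SESSION_WINDOWS_UTC.items() in insertion order
def pvWindows : List (String × Int × Int) :=
  [("asia",0,8),("london",8,13),("ny_overlap",13,17),("ny_late",17,21),("dead_zone",21,24)]

-- the for-loop with early returns, as structural recursion over the items
def pvSessLoop (close_hour : Int) (pair : String) : List (String × Int × Int) → Option String
  | [] => none
  | (s, st, en) :: rest =>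
    if s = "dead_zone" then pvSessLoop close_hour pair rest
    else if st ≤ close_hour ∧ close_hour < en then
      if s = "asia" ∧ pair ∉ pvAsiaPairs then none else some s
    else pvSessLoop close_hour pair rest

def get_current_session_py (close_hour : Int) (pair : String) : Option String :=
  pvSessLoop close_hour pair pvWindows

-- ===== PORT B =====
-- HOUR_TO_SESSION: 24-entry table, hour index -> session name (None for 21..23)
def pvHourTable : List (Option String) :=
  List.replicate 8 (some "asia") ++ List.replicate 5 (some "london") ++
  List.replicate 4 (some "ny_overlap") ++ List.replicate 4 (some "ny_late") ++
  List.replicate 3 none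

def get_current_session_py_alt (close_hour : Int) (pair : String) : Option String :=
  if 0 ≤ close_hour ∧ close_hour < 24 then
    match pvHourTable.getD close_hour.toNat none with
    | none => none
    | some s => if s = "asia" ∧ pair ∉ pvAsiaPairs then none else some s
  else none

-- ===== PRECONDITION & SPEC =====
def Spec_get_current_session_py (close_hour : Int) (pair : String) (out : Option String) : Prop := out = get_current_session_py_alt close_hour pair
instance (close_hour : Int) (pair : String) (out : Option String) : Decidable (Spec_get_current_session_py close_hour pair out) := by unfold Spec_get_current_session_py; infer_instance

-- ===== CLAIM (what is proved, stated in full; the proofs are below) =====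
def Claim_equal_get_current_session_py : Prop := ∀ (close_hour : Int) (pair : String), Dom_get_current_session_py close_hour pair → Spec_get_current_session_py close_hour pair (get_current_session_py close_hour pair)

-- ===== LEMMAS AND PROOFS =====

-- ===== VERDICT (by name: the statement is the Claim_ definition above) =====
theorem get_current_session_py_spec : Claim_equal_get_current_session_py := by
  intro h p _
  unfold Spec_get_current_session_py
  by_cases hb : 0 ≤ h ∧ h < 24
  · obtain ⟨h0, h1⟩ := hb
    interval_cases h <;>
      simp [get_current_session_py, get_current_session_py_alt, pvSessLoop, pvWindows, pvHourTable]
  · simp only [get_current_session_py, get_current_session_py_alt, pvWindows, pvSessLoop,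
      if_neg hb]
    split_ifs <;> first | rfl | omega
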